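-- pv_equiv track=rewrite | github.com/VRYella/NonBScanner | nbdio/fasta.py | parse_fasta_string
-- ===== SOURCE A (Python) =====
-- from typing import Dict, List, Tuple, Iterator, Optional, Union
--
-- def parse_fasta_string(fasta_content: str) -> Dict[str, str]:
--     """
--     Parse FASTA content from string.
--
--     Args:
--         fasta_content: FASTA formatted string
--
--     Returns:
--         Dictionary mapping sequence names to sequences
--     """
--     sequences = {}
--     current_name = None
--     current_seq = []
--
--     for line in fasta_content.strip().split('\n'):
--         line = line.strip()
--
--         if line.startswith('>'):
--             # Save previous sequence
--             if current_name is not None: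
--                 sequences[current_name] = ''.join(current_seq).upper()
--
--             # Start new sequence
--             current_name = line[1:].split()[0]  # Take first word after >
--             current_seq = []
--
--         elif current_name is not None:
--             # Add to current sequence
--             current_seq.append(line.replace(' ', '').replace('U', 'T'))
--
--     # Save last sequence
--     if current_name is not None:
--         sequences[current_name] = ''.join(current_seq).upper()
--
--     return sequences
-- ===== SOURCE B (Python) =====
-- def parse_fasta_string(fasta_content):
--     """Parse FASTA content: two passes — first group lines into (header, body-lines)
--     records, then emit each record into the dict (last duplicate name wins)."""
--     lines = [l.strip() for l in fasta_content.strip().split('\n')]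
--     records = []
--     for line in lines:
--         if line.startswith('>'):
--             records.append((line, []))
--         elif records:
--             records[-1][1].append(line)
--     result = {}
--     for header, body in records:
--         name = header[1:].split()[0]
--         seq = ''.join(l.replace(' ', '').replace('U', 'T') for l in body)
--         result[name] = seq.upper()
--     return result
-- ===== Notes on version B (the rewrite author's own statement) =====
-- stated objective: alternative
-- what changed: B replaces A's single pass carrying (dict, current_name, current_seq) state with two passes: pass one groups the stripped lines into an ordered list of (header, body-lines) records, pass two maps each record to its (name, cleaned-joined-uppercased sequence) dict entry.
import Mathlib
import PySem

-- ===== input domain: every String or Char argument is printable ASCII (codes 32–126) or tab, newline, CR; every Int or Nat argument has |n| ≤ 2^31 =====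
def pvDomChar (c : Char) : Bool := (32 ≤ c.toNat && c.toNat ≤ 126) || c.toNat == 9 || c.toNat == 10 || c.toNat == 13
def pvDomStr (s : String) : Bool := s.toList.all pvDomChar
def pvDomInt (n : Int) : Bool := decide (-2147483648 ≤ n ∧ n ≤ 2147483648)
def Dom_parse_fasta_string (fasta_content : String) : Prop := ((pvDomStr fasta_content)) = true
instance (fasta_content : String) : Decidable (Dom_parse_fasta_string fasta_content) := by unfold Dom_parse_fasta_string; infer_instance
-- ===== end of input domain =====

-- B parses in two passes (group lines into (header, body) records, then emit each record
-- into the dict) instead of A's single pass with carried current-name/current-seq state.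


-- helpers shared literally by both Python versions:
-- line.replace(' ', '').replace('U', 'T')
def pvClean (line : String) : String :=
  PySem.Str.replace (PySem.Str.replace line " " "") "U" "T"
-- header[1:].split()[0]; Python raises IndexError when header[1:].split() == [] (header == '>'),
-- excluded by Pre_ below; there pyGet? is none and we default to "".
def pvName (header : String) : String :=
  (PySem.List.pyGet? (PySem.Str.split₀ (PySem.Str.slice header (some 1) none)) 0).getD ""

-- ===== PORT A =====
-- A's loop state: (sequences, current_name, current_seq)
def pvAState : Type := PySem.Dict String String × Option String × List String

def pvAStep (st : pvAState) (line0 : String) : pvAState :=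
  let line := PySem.Str.strip line0
  if PySem.Str.startswith line ">" then
    let seqs := match st.2.1 with
      | some n => st.1.insert n (PySem.Str.upper (PySem.Str.join "" st.2.2))
      | none => st.1
    (seqs, some (pvName line), [])
  else
    match st.2.1 with
    | some _ => (st.1, st.2.1, st.2.2 ++ [pvClean line])
    | none => st

-- the trailing "save last sequence" step
def pvFin (st : pvAState) : PySem.Dict String String :=
  match st.2.1 with
  | some n => st.1.insert n (PySem.Str.upper (PySem.Str.join "" st.2.2))
  | none => st.1

def parse_fasta_string (fasta_content : String) : List (String × String) :=
  (pvFin (((PySem.Str.split? (PySem.Str.strip fasta_content) "\n").getD []).foldl pvAStep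
    (PySem.Dict.empty, none, []))).items

-- ===== PORT B =====
-- pass 1: records.append((line, [])) on a header, records[-1][1].append(line) otherwise
def pvRecStep (recs : List (String × List String)) (line : String) : List (String × List String) :=
  if PySem.Str.startswith line ">" then recs ++ [(line, [])]
  else
    match recs.getLast? with
    | none => recs
    | some (h, b) => recs.dropLast ++ [(h, b ++ [line])]

-- pass 2: result[name] = seq.upper()
def pvEmit (d : PySem.Dict String String) (r : String × List String) : PySem.Dict String String :=
  d.insert (pvName r.1) (PySem.Str.upper (PySem.Str.join "" (r.2.map pvClean)))

def parse_fasta_string_alt (fasta_content : String) : List (String × String) :=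
  let lines := ((PySem.Str.split? (PySem.Str.strip fasta_content) "\n").getD []).map PySem.Str.strip
  ((lines.foldl pvRecStep []).foldl pvEmit PySem.Dict.empty).items

-- ===== PRECONDITION & SPEC =====
-- Pre_ excludes exactly the inputs where some line strips to a bare '>': there
-- header[1:].split()[0] raises IndexError in A (and in B alike).
def Pre_parse_fasta_string (fasta_content : String) : Prop :=
  ∀ l ∈ (PySem.Str.split? (PySem.Str.strip fasta_content) "\n").getD [], PySem.Str.strip l ≠ ">"
instance (fasta_content : String) : Decidable (Pre_parse_fasta_string fasta_content) := by
  unfold Pre_parse_fasta_string; infer_instance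

def pvWitness_parse_fasta_string : String := ">seq1 desc\nAC GU\nacgu\n>seq2\nTT"

def Spec_parse_fasta_string (fasta_content : String) (out : List (String × String)) : Prop :=
  out = parse_fasta_string_alt fasta_content
instance (fasta_content : String) (out : List (String × String)) : Decidable (Spec_parse_fasta_string fasta_content out) := by
  unfold Spec_parse_fasta_string; infer_instance

-- ===== CLAIM (what is proved, stated in full; the proofs are below) =====
def Claim_equal_parse_fasta_string : Prop := ∀ (fasta_content : String), Dom_parse_fasta_string fasta_content → Pre_parse_fasta_string fasta_content → Spec_parse_fasta_string fasta_content (parse_fasta_string fasta_content)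

-- ===== LEMMAS AND PROOFS =====

-- A's loop state components corresponding to B's (at most one) open record
def pvCurName : Option (String × List String) → Option String
  | none => none
  | some r => some (pvName r.1)

def pvCurSeq : Option (String × List String) → List String
  | none => []
  | some r => r.2.map pvClean

theorem pvRecStep_ne_nil (t : List (String × List String)) (l : String) (ht : t ≠ []) :
    pvRecStep t l ≠ [] := by
  unfold pvRecStep
  split_ifs with h
  · simp
  · match hlast : t.getLast? with
    | none => simpa using ht (List.getLast?_eq_none_iff.mp hlast)
    | some (hd, b) => simp

theorem pvRecStep_append (rs t : List (String × List String)) (l : String) (ht : t ≠ []) :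
    pvRecStep (rs ++ t) l = rs ++ pvRecStep t l := by
  unfold pvRecStep
  split_ifs with h
  · simp
  · rw [List.getLast?_append_of_ne_nil rs ht, List.dropLast_append_of_ne_nil ht]
    match hlast : t.getLast? with
    | none => exact absurd (List.getLast?_eq_none_iff.mp hlast) ht
    | some (hd, b) => simp

theorem pvFoldRec_append (ls : List String) (rs t : List (String × List String))
    (ht : t ≠ []) :
    ls.foldl (fun r l => pvRecStep r (PySem.Str.strip l)) (rs ++ t)
      = rs ++ ls.foldl (fun r l => pvRecStep r (PySem.Str.strip l)) t := by
  induction ls generalizing t with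
  | nil => rfl
  | cons l ls ih =>
      simp only [List.foldl_cons]
      rw [pvRecStep_append rs t _ ht, ih _ (pvRecStep_ne_nil t _ ht)]

-- the invariant: A's fold state tracks B's record list with at most one open record
theorem pv_main (ls : List String) (d : PySem.Dict String String)
    (cur : Option (String × List String)) :
    pvFin (ls.foldl pvAStep (d, pvCurName cur, pvCurSeq cur))
      = List.foldl pvEmit d
          (ls.foldl (fun r l => pvRecStep r (PySem.Str.strip l)) cur.toList) := by
  induction ls generalizing d cur with
  | nil =>
      cases cur with
      | none => rfl
      | some r => rfl
  | cons l ls ih =>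
      simp only [List.foldl_cons]
      by_cases hs : PySem.Str.startswith (PySem.Str.strip l) ">" = true
      · cases cur with
        | none =>
            have h1 : pvAStep (d, pvCurName none, pvCurSeq none) l
                = (d, pvCurName (some (PySem.Str.strip l, [])),
                   pvCurSeq (some (PySem.Str.strip l, []))) := by
              simp only [pvAStep, pvCurName, pvCurSeq]
              rw [if_pos hs]
              rfl
            have h2 : pvRecStep (Option.toList (α := String × List String) none)
                  (PySem.Str.strip l)
                = Option.toList (some (PySem.Str.strip l, ([] : List String))) := by
              simp only [pvRecStep, Option.toList]
              rw [if_pos hs]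
              rfl
            rw [h1, h2]
            exact ih d (some (PySem.Str.strip l, []))
        | some r =>
            have h1 : pvAStep (d, pvCurName (some r), pvCurSeq (some r)) l
                = (pvEmit d r, pvCurName (some (PySem.Str.strip l, [])),
                   pvCurSeq (some (PySem.Str.strip l, []))) := by
              simp only [pvAStep, pvCurName, pvCurSeq, pvEmit]
              rw [if_pos hs]
              rfl
            have h2 : pvRecStep (Option.toList (some r)) (PySem.Str.strip l)
                = [r] ++ [(PySem.Str.strip l, ([] : List String))] := by
              simp only [pvRecStep, Option.toList]
              rw [if_pos hs]
            rw [h1, h2, pvFoldRec_append ls [r] [(PySem.Str.strip l, [])] (by simp),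
                List.foldl_append, List.foldl_cons, List.foldl_nil]
            exact ih (pvEmit d r) (some (PySem.Str.strip l, []))
      · cases cur with
        | none =>
            have h1 : pvAStep (d, pvCurName none, pvCurSeq none) l
                = (d, pvCurName none, pvCurSeq none) := by
              simp only [pvAStep, pvCurName, pvCurSeq]
              rw [if_neg hs]
            have h2 : pvRecStep (Option.toList (α := String × List String) none)
                  (PySem.Str.strip l)
                = Option.toList (α := String × List String) none := by
              simp only [pvRecStep, Option.toList]
              rw [if_neg hs]
              rfl
            rw [h1, h2]
            exact ih d none
        | some r =>
            have h1 : pvAStep (d, pvCurName (some r), pvCurSeq (some r)) l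
                = (d, pvCurName (some (r.1, r.2 ++ [PySem.Str.strip l])),
                   pvCurSeq (some (r.1, r.2 ++ [PySem.Str.strip l]))) := by
              simp only [pvAStep, pvCurName, pvCurSeq]
              rw [if_neg hs]
              simp
            have h2 : pvRecStep (Option.toList (some r)) (PySem.Str.strip l)
                = Option.toList (some (r.1, r.2 ++ [PySem.Str.strip l])) := by
              simp only [pvRecStep, Option.toList]
              rw [if_neg hs]
              rfl
            rw [h1, h2]
            exact ih d (some (r.1, r.2 ++ [PySem.Str.strip l]))

-- ===== VERDICT (by name: the statement is the Claim_ definition above) =====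
theorem parse_fasta_string_spec : Claim_equal_parse_fasta_string := by
  intro fc _ _
  unfold Spec_parse_fasta_string parse_fasta_string parse_fasta_string_alt
  simp only [List.foldl_map]
  exact congrArg PySem.Dict.items
    (pv_main ((PySem.Str.split? (PySem.Str.strip fc) "\n").getD []) PySem.Dict.empty none)
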